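-- pv_equiv track=rewrite | github.com/skitela/potential-robot | BIN/unified_learning_pack.py | _symbol_base
-- ===== SOURCE A (Python) =====
-- from typing import Any, Dict, Iterable, List, Optional, Tuple
--
-- def _symbol_base(raw: Any) -> str:
--     s = str(raw or "").strip().upper()
--     if not s:
--         return ""
--     for sep in (".", "-", "_"):
--         if sep in s:
--             s = s.split(sep, 1)[0]
--     if s.endswith(".PRO"):
--         s = s[:-4]
--     return s
-- ===== SOURCE B (Python) =====
-- def _symbol_base(raw):
--     s = str(raw or "").strip().upper()
--     for i, ch in enumerate(s):
--         if ch in ".-_":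
--             return s[:i]
--     return s
-- ===== Notes on version B (the rewrite author's own statement) =====
-- stated objective: alternative
-- what changed: Replaces A's loop over the separator tuple with repeated split(sep,1) calls (plus the unreachable '.PRO' suffix branch) by a single left-to-right character scan that returns the prefix before the first separator.
import Mathlib
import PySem

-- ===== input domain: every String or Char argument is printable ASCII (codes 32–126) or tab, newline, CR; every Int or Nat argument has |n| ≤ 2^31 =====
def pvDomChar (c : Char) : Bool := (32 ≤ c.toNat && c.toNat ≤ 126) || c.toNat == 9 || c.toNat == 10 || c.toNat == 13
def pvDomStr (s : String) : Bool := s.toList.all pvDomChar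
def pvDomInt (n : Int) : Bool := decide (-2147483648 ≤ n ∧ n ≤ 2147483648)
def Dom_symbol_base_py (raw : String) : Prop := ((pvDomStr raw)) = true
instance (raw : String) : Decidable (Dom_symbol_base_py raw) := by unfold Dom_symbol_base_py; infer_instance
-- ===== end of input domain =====

-- B replaces A's loop over the separator tuple (repeated split calls) by a single left-to-right
-- character scan that cuts at the first separator, dropping the unreachable '.PRO' branch. (alternative)

-- ===== PORT A =====
-- literal transliteration of A: s = str(raw or "").strip().upper(); loop over (".","-","_")
-- with 'if sep in s: s = s.split(sep, 1)[0]'; then the '.PRO' suffix check.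
-- loop body: 'if sep in s: s = s.split(sep, 1)[0]'
def pvAStep (s sep : String) : String :=
  if PySem.Str.isIn sep s then
    match PySem.Str.splitMax? s sep 1 with
    | some (p :: _) => p            -- s.split(sep, 1)[0]; split with a nonempty sep is always some/nonempty
    | _ => s
  else s

def symbol_base_py (raw : String) : String :=
  let s0 := PySem.Str.upper (PySem.Str.strip (if raw == "" then "" else raw))
  if s0 == "" then ""
  else
    let s1 := [".", "-", "_"].foldl pvAStep s0
    if PySem.Str.endswith s1 ".PRO" then PySem.Str.slice s1 none (some (-4)) else s1

-- ===== PORT B =====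
-- 'ch in ".-_"' for the scanned character
def pvIsSep (c : Char) : Bool := PySem.Chars.isIn [c] (String.toList ".-_")

-- 'for i, ch in enumerate(s): if ch in ".-_": return i-as-cut-point' — first separator index
def pvScan : List Char → Nat → Option Nat
  | [], _ => none
  | c :: rest, i => if pvIsSep c then some i else pvScan rest (i + 1)

def symbol_base_py_alt (raw : String) : String :=
  let s := PySem.Str.upper (PySem.Str.strip (if raw == "" then "" else raw))
  match pvScan s.toList 0 with
  | some i => PySem.Str.slice s none (some (i : Int))   -- return s[:i]
  | none => s                                           -- return s

-- ===== PRECONDITION & SPEC =====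
def Spec_symbol_base_py (raw : String) (out : String) : Prop := out = symbol_base_py_alt raw
instance (raw : String) (out : String) : Decidable (Spec_symbol_base_py raw out) := by unfold Spec_symbol_base_py; infer_instance

-- ===== CLAIM (what is proved, stated in full; the proofs are below) =====
def Claim_equal_symbol_base_py : Prop := ∀ (raw : String), Dom_symbol_base_py raw → Spec_symbol_base_py raw (symbol_base_py raw)

-- ===== LEMMAS AND PROOFS =====

theorem pvScan_shift (l : List Char) : ∀ (i : Nat), pvScan l i = (pvScan l 0).map (· + i) := by
  induction l with
  | nil => intro i; simp [pvScan]
  | cons c rest ih =>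
    intro i
    by_cases h : pvIsSep c
    · simp [pvScan, h]
    · simp only [pvScan, h]
      rw [ih (i + 1), ih 1]
      cases pvScan rest 0
      · simp
      · simp; omega

theorem pvScan_spec (l : List Char) :
    (pvScan l 0 = none → l.takeWhile (fun c => !pvIsSep c) = l) ∧
    (∀ j, pvScan l 0 = some j → l.take j = l.takeWhile (fun c => !pvIsSep c)) := by
  induction l with
  | nil => simp [pvScan]
  | cons c rest ih =>
    by_cases h : pvIsSep c
    · refine ⟨by simp [pvScan, h], ?_⟩
      intro j hj
      simp [pvScan, h] at hj
      subst hj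
      simp [h]
    · constructor
      · intro hn
        simp only [pvScan, h, pvScan_shift rest 1] at hn
        cases hr : pvScan rest 0 with
        | none => simp [h, ih.1 hr]
        | some j => simp [hr] at hn
      · intro j hj
        simp only [pvScan, h, pvScan_shift rest 1] at hj
        cases hr : pvScan rest 0 with
        | none => simp [hr] at hj
        | some k =>
          simp [hr] at hj
          subst hj
          simp [h, ih.2 k hr]

theorem pvIsSep_iff (c : Char) : pvIsSep c = true ↔ (c = '.' ∨ c = '-' ∨ c = '_') := by
  unfold pvIsSep
  rw [PySem.Chars.isIn_iff_infix, List.singleton_infix_iff]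
  constructor
  · intro h; simpa using h
  · intro h; simpa using h

-- proof-only view of B's body: the match on pvScan, abstracted over the prepared string
def pvCut (s : String) : String :=
  match pvScan s.toList 0 with
  | some i => PySem.Str.slice s none (some (i : Int))
  | none => s

theorem alt_eq (raw : String) :
    symbol_base_py_alt raw =
      pvCut (PySem.Str.upper (PySem.Str.strip (if raw == "" then "" else raw))) := rfl

-- B's result, characterised on the char list
theorem pvCut_toList (s : String) :
    (pvCut s).toList = s.toList.takeWhile (fun c => !pvIsSep c) := by
  unfold pvCut
  cases hr : pvScan s.toList 0 with
  | none => simpa using ((pvScan_spec s.toList).1 hr).symm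
  | some j =>
    have h2 := (pvScan_spec s.toList).2 j hr
    rw [PySem.Str.toList_slice, PySem.Chars.slice_eq_listSlice,
      PySem.List.slice_to _ (by positivity : (0:Int) ≤ (j:Int))]
    simpa using h2

-- one A-step 'if sep in s: s = s.split(sep,1)[0]' is takeWhile (· ≠ c)
theorem splitOnMax_go_zero (sep : List Char) (fuel : Nat) (l cur : List Char) (acc : List (List Char)) :
    PySem.Chars.splitOnMax.go sep fuel 0 l cur acc = acc.reverse ++ [cur.reverse ++ l] := by
  cases fuel <;> cases l <;> simp [PySem.Chars.splitOnMax.go]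

theorem splitOnMax_go_one (c : Char) :
    ∀ (fuel : Nat) (l cur : List Char) (acc : List (List Char)), l.length < fuel →
      ∃ t, PySem.Chars.splitOnMax.go [c] fuel 1 l cur acc =
        acc.reverse ++ (cur.reverse ++ l.takeWhile (fun x => !(x == c))) :: t := by
  intro fuel
  induction fuel with
  | zero => intro l cur acc h; omega
  | succ f ih =>
    intro l cur acc h
    cases l with
    | nil => exact ⟨[], by simp [PySem.Chars.splitOnMax.go]⟩
    | cons c' rest =>
      by_cases hc : c' = c
      · subst hc
        refine ⟨?_, ?_⟩
        · exact [rest]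
        · simp [PySem.Chars.splitOnMax.go, List.isPrefixOf, splitOnMax_go_zero]
      · obtain ⟨t, ht⟩ := ih rest (c' :: cur) acc (by simp at h ⊢; omega)
        refine ⟨t, ?_⟩
        have hpre : [c].isPrefixOf (c' :: rest) = false := by
          simp [List.isPrefixOf]; exact fun h' => absurd h'.symm hc
        simp [PySem.Chars.splitOnMax.go, hpre, ht, hc]

theorem stepA (c : Char) (sep : String) (hsep : sep.toList = [c]) (s : String) :
    (pvAStep s sep).toList = s.toList.takeWhile (fun x => !(x == c)) := by
  by_cases hin : PySem.Str.isIn sep s = true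
  · obtain ⟨t, ht⟩ := splitOnMax_go_one c (s.toList.length + 1) s.toList [] [] (by omega)
    have hsplit : PySem.Str.splitMax? s sep 1 =
        some (String.ofList (s.toList.takeWhile (fun x => !(x == c))) :: t.map String.ofList) := by
      unfold PySem.Str.splitMax? PySem.Chars.splitMax? PySem.Chars.splitOnMax
      rw [hsep]
      have h1 : ((1 : Int) < 0) = False := by norm_num
      simp only [List.isEmpty_cons, Bool.false_eq_true, if_false, h1, Int.toNat_one]
      rw [ht]
      simp
    unfold pvAStep
    rw [if_pos hin, hsplit]
    simp
  · have hc : c ∉ s.toList := by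
      intro hmem
      apply hin
      show PySem.Chars.isIn sep.toList s.toList = true
      rw [hsep, PySem.Chars.isIn_iff_infix, List.singleton_infix_iff]
      exact hmem
    simp only [pvAStep, hin, Bool.false_eq_true, if_false]
    refine (List.takeWhile_eq_self_iff.mpr ?_).symm
    intro x hx
    simp only [Bool.not_eq_eq_eq_not, Bool.not_true, beq_eq_false_iff_ne]
    exact fun h => hc (h ▸ hx)

-- A's three sequential cuts collapse to B's single scan predicate
theorem tw_chain (l : List Char) :
    ((l.takeWhile (fun x => !(x == '.'))).takeWhile (fun x => !(x == '-'))).takeWhile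
        (fun x => !(x == '_')) =
      l.takeWhile (fun c => !pvIsSep c) := by
  induction l with
  | nil => simp
  | cons c rest ih =>
    by_cases hb : pvIsSep c = true
    · rcases (pvIsSep_iff c).mp hb with h | h | h <;> subst h
      · simp [hb]
      · simp [hb]
      · simp [hb]
    · have hb' : pvIsSep c = false := by simpa using hb
      have h1 : (c == '.') = false :=
        beq_eq_false_iff_ne.mpr fun h => hb ((pvIsSep_iff c).mpr (Or.inl h))
      have h2 : (c == '-') = false :=
        beq_eq_false_iff_ne.mpr fun h => hb ((pvIsSep_iff c).mpr (Or.inr (Or.inl h)))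
      have h3 : (c == '_') = false :=
        beq_eq_false_iff_ne.mpr fun h => hb ((pvIsSep_iff c).mpr (Or.inr (Or.inr h)))
      simp [h1, h2, h3, hb', ih]

-- A's whole body after the 'str(raw or "").strip().upper()' preparation, over an arbitrary prepared string
theorem A_body (s0 : String) :
    (if s0 == "" then ""
     else if PySem.Str.endswith ([".", "-", "_"].foldl pvAStep s0) ".PRO" then
       PySem.Str.slice ([".", "-", "_"].foldl pvAStep s0) none (some (-4))
     else [".", "-", "_"].foldl pvAStep s0) =
      pvCut s0 := by
  by_cases h0 : (s0 == "") = true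
  · rw [if_pos h0]
    have he : s0 = "" := by simpa using h0
    rw [he]
    rfl
  · rw [if_neg h0]
    rw [List.foldl_cons, List.foldl_cons, List.foldl_cons, List.foldl_nil]
    have e1 : (pvAStep s0 ".").toList = s0.toList.takeWhile (fun x => !(x == '.')) :=
      stepA '.' "." rfl s0
    have e2 : (pvAStep (pvAStep s0 ".") "-").toList =
        (s0.toList.takeWhile (fun x => !(x == '.'))).takeWhile (fun x => !(x == '-')) := by
      rw [stepA '-' "-" rfl _, e1]
    have e3 : (pvAStep (pvAStep (pvAStep s0 ".") "-") "_").toList =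
        ((s0.toList.takeWhile (fun x => !(x == '.'))).takeWhile
          (fun x => !(x == '-'))).takeWhile (fun x => !(x == '_')) := by
      rw [stepA '_' "_" rfl _, e2]
    set s1 := pvAStep (pvAStep (pvAStep s0 ".") "-") "_" with hs1
    have hend : PySem.Str.endswith s1 ".PRO" = false := by
      by_contra hcon
      rw [Bool.not_eq_false] at hcon
      have hsuf : (".PRO" : String).toList <:+ s1.toList := by
        rw [show PySem.Str.endswith s1 ".PRO" = PySem.Chars.endswith s1.toList (".PRO" : String).toList from rfl,
          PySem.Chars.endswith_iff] at hcon
        exact hcon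
      have hmem : '.' ∈ s1.toList := hsuf.subset (by decide)
      rw [e3] at hmem
      have hm2 := (List.takeWhile_sublist _).subset hmem
      have hm3 := (List.takeWhile_sublist _).subset hm2
      have := List.mem_takeWhile_imp hm3
      simp at this
    rw [if_neg (by rw [hend]; simp)]
    apply String.toList_inj.mp
    rw [e3, pvCut_toList]
    exact tw_chain s0.toList

-- ===== VERDICT (by name: the statement is the Claim_ definition above) =====
theorem symbol_base_py_spec : Claim_equal_symbol_base_py := by
  intro raw _
  unfold Spec_symbol_base_py
  rw [alt_eq]
  exact A_body (PySem.Str.upper (PySem.Str.strip (if raw == "" then "" else raw)))
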